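-- pv_equiv track=rewrite | github.com/dannyxn/Graphs-Toolbox | algorithms/center_node.py | center_node
-- ===== SOURCE A (Python) =====
-- def center_node(weights_matrix: list) -> list:
--     center = 0
--     for row in range(len(weights_matrix)):
--         if sum(weights_matrix[row]) < sum(weights_matrix[center]):
--             center = row
--     min = sum(weights_matrix[center])
--     result = []
--     for row in range(len(weights_matrix)):
--         if sum(weights_matrix[row]) == min:
--             result.append(row)
--     return result
-- ===== SOURCE B (Python) =====
-- def center_node(weights_matrix: list) -> list:
--     best = None
--     result = []
--     for i, row in enumerate(weights_matrix):
--         s = sum(row)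
--         if best is None or s < best:
--             best, result = s, [i]
--         elif s == best:
--             result.append(i)
--     return result
-- ===== Notes on version B (the rewrite author's own statement) =====
-- stated objective: alternative
-- what changed: Single pass with a running (best, result) accumulator that resets the index list on a new minimum and appends on ties, replacing A's two separate index loops that re-sum every row.
import Mathlib
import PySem

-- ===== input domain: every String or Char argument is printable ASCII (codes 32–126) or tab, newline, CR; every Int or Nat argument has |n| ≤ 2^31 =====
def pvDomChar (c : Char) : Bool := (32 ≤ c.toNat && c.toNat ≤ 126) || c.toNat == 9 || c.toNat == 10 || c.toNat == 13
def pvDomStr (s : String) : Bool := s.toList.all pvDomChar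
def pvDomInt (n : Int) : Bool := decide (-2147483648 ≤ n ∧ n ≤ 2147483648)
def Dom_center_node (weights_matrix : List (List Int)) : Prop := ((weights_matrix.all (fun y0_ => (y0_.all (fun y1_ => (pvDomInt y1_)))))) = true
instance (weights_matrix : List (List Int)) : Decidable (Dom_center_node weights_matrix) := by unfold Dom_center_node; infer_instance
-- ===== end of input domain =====

-- B is a single pass over the rows with a running (best, result) accumulator (reset on a
-- strictly smaller sum, append on a tie), replacing A's two index loops that re-sum rows.

-- ===== PORT A =====
def center_node (weights_matrix : List (List Int)) : List Int :=
  let center := (List.range weights_matrix.length).foldl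
    (fun c r => if (weights_matrix.getD r []).sum < (weights_matrix.getD c []).sum then r else c) 0
  let mn := (weights_matrix.getD center []).sum
  (List.range weights_matrix.length).foldl
    (fun res r => if (weights_matrix.getD r []).sum = mn then res ++ [(r : Int)] else res) []

-- ===== PORT B =====
def center_node_alt (weights_matrix : List (List Int)) : List Int :=
  ((PySem.List.enumerate weights_matrix 0).foldl
    (fun (acc : Option Int × List Int) p =>
      let s := p.2.sum
      match acc.1 with
      | none => (some s, [p.1])
      | some b =>
        if s < b then (some s, [p.1])
        else if s = b then (some b, acc.2 ++ [p.1])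
        else acc)
    (none, [])).2

-- ===== PRECONDITION & SPEC =====
-- Pre_ excludes only the empty matrix, on which the Python A raises IndexError.
def Pre_center_node (weights_matrix : List (List Int)) : Prop := weights_matrix ≠ []
instance (weights_matrix : List (List Int)) : Decidable (Pre_center_node weights_matrix) := by unfold Pre_center_node; infer_instance
def pvWitness_center_node : List (List Int) := [[1, 2], [3], [0, 3]]

def Spec_center_node (weights_matrix : List (List Int)) (out : List Int) : Prop := out = center_node_alt weights_matrix
instance (weights_matrix : List (List Int)) (out : List Int) : Decidable (Spec_center_node weights_matrix out) := by unfold Spec_center_node; infer_instance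

-- ===== CLAIM (what is proved, stated in full; the proofs are below) =====
def Claim_equal_center_node : Prop := ∀ (weights_matrix : List (List Int)), Dom_center_node weights_matrix → Pre_center_node weights_matrix → Spec_center_node weights_matrix (center_node weights_matrix)

-- ===== LEMMAS AND PROOFS =====

-- A's first loop, expressed over the list of row sums
def aCent (xs : List Int) : Nat :=
  (List.range xs.length).foldl (fun c r => if xs.getD r 0 < xs.getD c 0 then r else c) 0

-- the minimum row sum (what A's first loop computes the index of)
def bMin (xs : List Int) : Int :=
  xs.tail.foldl (fun a s => if s < a then s else a) (xs.headD 0)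

-- B's loop body, over the list of row sums
def bStep (acc : Option Int × List Int) (p : Int × Int) : Option Int × List Int :=
  match acc.1 with
  | none => (some p.2, [p.1])
  | some b =>
    if p.2 < b then (some p.2, [p.1])
    else if p.2 = b then (some b, acc.2 ++ [p.1])
    else acc

-- the common characterisation: indices whose sum is minimal, in order
def minIdx (xs : List Int) : List Int :=
  ((List.range xs.length).filter (fun r => xs.getD r 0 == bMin xs)).map (fun r => (r : Int))

theorem sum_getD_eq (m : List (List Int)) (r : Nat) :
    (m.getD r []).sum = (m.map List.sum).getD r 0 := by
  induction m generalizing r with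
  | nil => cases r <;> simp [List.getD]
  | cons x xs ih =>
    cases r with
    | zero => simp
    | succ n => simpa using ih n

theorem aCent_lt (xs : List Int) (h : xs ≠ []) : aCent xs < xs.length := by
  have hgen : ∀ (l : List Nat) (c : Nat), (∀ r ∈ l, r < xs.length) → c < xs.length →
      l.foldl (fun c r => if xs.getD r 0 < xs.getD c 0 then r else c) c < xs.length := by
    intro l
    induction l with
    | nil => intro c _ hc; simpa using hc
    | cons a l ih =>
      intro c hl hc
      simp only [List.foldl_cons]
      refine ih _ (fun r hr => hl r (by simp [hr])) ?_
      split
      · exact hl a (by simp)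
      · exact hc
  exact hgen _ 0 (fun r hr => List.mem_range.mp hr) (List.length_pos_iff.mpr h)

theorem foldl_getD_append (ys : List Int) (y : Int) (l : List Nat) (c : Nat)
    (hl : ∀ r ∈ l, r < ys.length) (hc : c < ys.length) :
    l.foldl (fun c r => if (ys ++ [y]).getD r 0 < (ys ++ [y]).getD c 0 then r else c) c
      = l.foldl (fun c r => if ys.getD r 0 < ys.getD c 0 then r else c) c := by
  induction l generalizing c with
  | nil => rfl
  | cons a l ih =>
    have ha : a < ys.length := hl a (by simp)
    simp only [List.foldl_cons, List.getD_append _ _ _ _ ha, List.getD_append _ _ _ _ hc]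
    have hc' : (if ys.getD a 0 < ys.getD c 0 then a else c) < ys.length := by
      split
      · exact ha
      · exact hc
    exact ih _ (fun r hr => hl r (by simp [hr])) hc'

theorem aCent_append (ys : List Int) (y : Int) (h : ys ≠ []) :
    aCent (ys ++ [y]) = if y < ys.getD (aCent ys) 0 then ys.length else aCent ys := by
  have hlen : (ys ++ [y]).length = ys.length + 1 := by simp
  unfold aCent
  rw [hlen, List.range_succ, List.foldl_append]
  rw [foldl_getD_append ys y _ 0 (fun r hr => List.mem_range.mp hr) (List.length_pos_iff.mpr h)]
  have hc := aCent_lt ys h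
  unfold aCent at hc
  simp only [List.foldl_cons, List.foldl_nil]
  have e1 : (ys ++ [y]).getD ys.length 0 = y := by simp [List.getD]
  have e2 := List.getD_append ys [y] 0 _ hc
  rw [e1, e2]

theorem bMin_append (ys : List Int) (y : Int) (h : ys ≠ []) :
    bMin (ys ++ [y]) = if y < bMin ys then y else bMin ys := by
  obtain ⟨a, l, rfl⟩ := List.exists_cons_of_ne_nil h
  unfold bMin
  simp [List.foldl_append]

theorem getD_aCent_eq_bMin (xs : List Int) (h : xs ≠ []) :
    xs.getD (aCent xs) 0 = bMin xs := by
  induction xs using List.reverseRecOn with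
  | nil => exact absurd rfl h
  | append_singleton ys y ih =>
    rcases eq_or_ne ys [] with rfl | hys
    · simp [aCent, bMin, List.getD]
    · rw [aCent_append ys y hys, bMin_append ys y hys, ← ih hys]
      by_cases hlt : y < ys.getD (aCent ys) 0
      · simp only [hlt, if_true]
        simp [List.getD]
      · have hc := aCent_lt ys hys
        simp only [hlt, if_false]
        exact List.getD_append _ _ _ _ hc

theorem bMin_le (xs : List Int) (h : xs ≠ []) (r : Nat) (hr : r < xs.length) :
    bMin xs ≤ xs.getD r 0 := by
  induction xs using List.reverseRecOn generalizing r with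
  | nil => exact absurd rfl h
  | append_singleton ys y ih =>
    rcases eq_or_ne ys [] with rfl | hys
    · have hr0 : r = 0 := by simp at hr; omega
      subst hr0; simp [bMin, List.getD]
    · rw [bMin_append ys y hys]
      rcases Nat.lt_or_ge r ys.length with hlt | hge
      · rw [List.getD_append _ _ _ _ hlt]
        have := ih hys r hlt
        split <;> omega
      · have hrl : r = ys.length := by
          have : r < ys.length + 1 := by simpa using hr
          omega
        subst hrl
        have : (ys ++ [y]).getD ys.length 0 = y := by simp [List.getD]
        rw [this]
        split <;> omega

theorem minIdx_append (ys : List Int) (y : Int) (h : ys ≠ []) :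
    minIdx (ys ++ [y]) =
      if y < bMin ys then [((ys.length : Nat) : Int)]
      else if y = bMin ys then minIdx ys ++ [((ys.length : Nat) : Int)]
      else minIdx ys := by
  unfold minIdx
  have hlen : (ys ++ [y]).length = ys.length + 1 := by simp
  rw [hlen, List.range_succ, List.filter_append]
  have hlast : (ys ++ [y]).getD ys.length 0 = y := by simp [List.getD]
  have hbm := bMin_append ys y h
  by_cases hlt : y < bMin ys
  · -- new strict minimum: no earlier index matches
    have hbm' : bMin (ys ++ [y]) = y := by rw [hbm]; simp [hlt]
    have hpre : (List.range ys.length).filter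
        (fun r => (ys ++ [y]).getD r 0 == bMin (ys ++ [y])) = [] := by
      apply List.filter_eq_nil_iff.mpr
      intro r hr
      have hrl := List.mem_range.mp hr
      rw [hbm', List.getD_append _ _ _ _ hrl]
      have := bMin_le ys h r hrl
      simp only [beq_iff_eq]
      omega
    rw [hpre, hbm']
    simp [hlt]
  · have hbm' : bMin (ys ++ [y]) = bMin ys := by rw [hbm]; simp [hlt]
    have hpre : (List.range ys.length).filter
        (fun r => (ys ++ [y]).getD r 0 == bMin (ys ++ [y]))
        = (List.range ys.length).filter (fun r => ys.getD r 0 == bMin ys) := by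
      apply List.filter_congr
      intro r hr
      rw [hbm', List.getD_append _ _ _ _ (List.mem_range.mp hr)]
    rw [hpre, hbm']
    by_cases heq : y = bMin ys
    · simp [heq]
    · simp [hlt, heq]

-- B's fold over the sums list computes (the minimum, the minimal indices)
theorem bFold_eq (xs : List Int) (h : xs ≠ []) :
    (PySem.List.enumerate xs 0).foldl bStep (none, []) = (some (bMin xs), minIdx xs) := by
  induction xs using List.reverseRecOn with
  | nil => exact absurd rfl h
  | append_singleton ys y ih =>
    rcases eq_or_ne ys [] with rfl | hys
    · simp [PySem.List.enumerate_cons, PySem.List.enumerate_nil, bStep, bMin, minIdx,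
        List.range_succ, List.getD]
    · rw [PySem.List.enumerate_append, List.foldl_append, ih hys]
      have hlen : ((0 : Int) + ys.length) = ((ys.length : Nat) : Int) := by ring
      rw [hlen, PySem.List.enumerate_cons, PySem.List.enumerate_nil]
      simp only [List.foldl_cons, List.foldl_nil, bStep]
      rw [bMin_append ys y hys, minIdx_append ys y hys]
      by_cases hlt : y < bMin ys
      · simp [hlt]
      · by_cases heq : y = bMin ys
        · simp [heq]
        · simp [hlt, heq]

-- enumerate commutes with map on the values
theorem enumerate_map_sum (m : List (List Int)) (s : Int) :
    PySem.List.enumerate (m.map List.sum) s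
      = (PySem.List.enumerate m s).map (fun p => (p.1, p.2.sum)) := by
  induction m generalizing s with
  | nil => simp [PySem.List.enumerate_nil]
  | cons x l ih =>
    simp [PySem.List.enumerate_cons, ih]

-- ===== VERDICT (by name: the statement is the Claim_ definition above) =====
theorem center_node_spec : Claim_equal_center_node := by
  intro m _ hpre
  unfold Spec_center_node center_node center_node_alt
  set xs := m.map List.sum with hxs
  have hxsne : xs ≠ [] := by simpa [hxs] using hpre
  have hlen : m.length = xs.length := by simp [hxs]
  have hget : ∀ r, (m.getD r []).sum = xs.getD r 0 := fun r => sum_getD_eq m r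
  simp only [hget, hlen]
  -- A side
  have hcent : (List.range xs.length).foldl (fun c r => if xs.getD r 0 < xs.getD c 0 then r else c) 0 = aCent xs := rfl
  have hmn : xs.getD (aCent xs) 0 = bMin xs := getD_aCent_eq_bMin xs hxsne
  rw [hcent, hmn]
  rw [PySem.List.foldl_append_ite (p := fun r => xs.getD r 0 = bMin xs) (f := fun r : Nat => ((r : Nat) : Int))]
  -- B side
  have hB : ((PySem.List.enumerate m 0).foldl
      (fun (acc : Option Int × List Int) p =>
        let s := p.2.sum
        match acc.1 with
        | none => (some s, [p.1])
        | some b =>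
          if s < b then (some s, [p.1])
          else if s = b then (some b, acc.2 ++ [p.1])
          else acc)
      (none, [])) = (PySem.List.enumerate xs 0).foldl bStep (none, []) := by
    rw [hxs, enumerate_map_sum, List.foldl_map]
    rfl
  rw [hB, bFold_eq xs hxsne]
  -- both equal minIdx xs
  have hfe : (fun r : Nat => decide (xs.getD r 0 = bMin xs)) = (fun r : Nat => xs.getD r 0 == bMin xs) := by
    funext r; cases h : xs.getD r 0 == bMin xs <;> simp_all
  simp only [List.nil_append, minIdx, hfe]
  simp [List.bind_eq_flatMap, List.pure_def, ← List.map_eq_flatMap]
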